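-- pv_equiv track=rewrite | github.com/BrandonLGitHub/EmergeGameAI | move_forecasting.py | move_possibility
-- ===== SOURCE A (Python) =====
-- def move_possibility(move_set):
--     #   stores each feature and the amount of times it occurs as not possible for each island
--     move_possibilities = {}
--     #   iterates over all the features and determines how many 0 values occur for each feature
--     for island, features in move_set.items():
--         # check if the key is already present in move_possibilities
--         for feature, possible in features.items():
--             if feature in move_possibilities:
--                 # increment count if the value is 0
--                 move_possibilities[feature] += 1 if possible == 0 else 0
--             else:
--                 # initialize count if the key is not present
--                 move_possibilities[feature] = 1 if possible == 0 else 0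
--
--     return move_possibilities
-- ===== SOURCE B (Python) =====
-- def move_possibility(move_set):
--     # Filter-count-join formulation: extract the feature names of all zero-valued
--     # pairs into one flat list, tally that list (counter idiom), then emit the
--     # counts in first-occurrence feature order, defaulting absent features to 0.
--     zero_features = [f for features in move_set.values() for f, v in features.items() if v == 0]
--     counts = {}
--     for f in zero_features:
--         counts[f] = counts.get(f, 0) + 1
--     order = dict.fromkeys(f for features in move_set.values() for f in features)
--     return {f: counts.get(f, 0) for f in order}
-- ===== Notes on version B (the rewrite author's own statement) =====
-- stated objective: alternative
-- what changed: A's single branchy init-or-increment pass over every (feature, value) pair is replaced by filter-count-join: extract the zero-valued features into a flat list, tally it with a counter, and join the tallies onto the deduplicated feature order with default 0.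
import Mathlib
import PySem

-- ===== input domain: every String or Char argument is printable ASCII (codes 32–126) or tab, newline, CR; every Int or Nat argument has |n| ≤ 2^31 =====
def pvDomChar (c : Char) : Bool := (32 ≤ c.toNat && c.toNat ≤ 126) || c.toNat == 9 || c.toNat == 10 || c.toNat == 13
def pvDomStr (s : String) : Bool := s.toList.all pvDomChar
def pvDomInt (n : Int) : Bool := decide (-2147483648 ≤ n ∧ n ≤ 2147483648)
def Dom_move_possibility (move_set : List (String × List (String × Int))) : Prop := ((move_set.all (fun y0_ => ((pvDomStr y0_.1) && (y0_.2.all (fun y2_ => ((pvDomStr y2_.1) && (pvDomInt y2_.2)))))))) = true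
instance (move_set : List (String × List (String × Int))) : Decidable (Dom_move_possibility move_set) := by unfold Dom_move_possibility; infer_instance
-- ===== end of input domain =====

-- B replaces A's single init-or-increment accumulator pass by filter-count-join: list the
-- zero-valued features, tally that list, then join onto the deduplicated feature order
-- with default 0 (alternative decomposition, same cost).


-- ===== PORT A =====
-- body of A's inner loop: init-or-increment per (feature, possible) pair
def pvStepA (mp : PySem.Dict String Int) (fp : String × Int) : PySem.Dict String Int :=
  if mp.contains fp.1 then
    -- move_possibilities[feature] += 1 if possible == 0 else 0  (key present, so getD is exact)
    mp.insert fp.1 (mp.getD fp.1 0 + (if fp.2 == 0 then 1 else 0))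
  else
    -- move_possibilities[feature] = 1 if possible == 0 else 0
    mp.insert fp.1 (if fp.2 == 0 then 1 else 0)

def move_possibility (move_set : List (String × List (String × Int))) : List (String × Int) :=
  (move_set.foldl (fun mp island => island.2.foldl pvStepA mp) PySem.Dict.empty).items

-- ===== PORT B =====
-- zero_features = [f for features in move_set.values() for f, v in features.items() if v == 0]
-- counts = {}; for f in zero_features: counts[f] = counts.get(f, 0) + 1
-- order = dict.fromkeys(f for features in move_set.values() for f in features)  (= PySem.List.dedup)
-- {f: counts.get(f, 0) for f in order}
def move_possibility_alt (move_set : List (String × List (String × Int))) : List (String × Int) :=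
  let zero_features :=
    ((move_set.flatMap (fun island => island.2)).filter (fun x => x.2 == 0)).map (·.1)
  let counts :=
    zero_features.foldl (fun d f => d.insert f (d.getD f 0 + 1))
      (PySem.Dict.empty : PySem.Dict String Int)
  let order := PySem.List.dedup ((move_set.flatMap (fun island => island.2)).map (·.1))
  order.map (fun f => (f, counts.getD f 0))

-- ===== PRECONDITION & SPEC =====
def Spec_move_possibility (move_set : List (String × List (String × Int))) (out : List (String × Int)) : Prop := out = move_possibility_alt move_set
instance (move_set : List (String × List (String × Int))) (out : List (String × Int)) : Decidable (Spec_move_possibility move_set out) := by unfold Spec_move_possibility; infer_instance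

-- ===== CLAIM (what is proved, stated in full; the proofs are below) =====
def Claim_equal_move_possibility : Prop := ∀ (move_set : List (String × List (String × Int))), Dom_move_possibility move_set → Spec_move_possibility move_set (move_possibility move_set)

-- ===== LEMMAS AND PROOFS =====

-- a nested fold over the islands' feature lists is a fold over the flattened pair list
theorem pv_foldl_nested (step : PySem.Dict String Int → String × Int → PySem.Dict String Int)
    (ms : List (String × List (String × Int))) (d : PySem.Dict String Int) :
    ms.foldl (fun r island => island.2.foldl step r) d
      = (ms.flatMap (fun island => island.2)).foldl step d := by
  induction ms generalizing d with
  | nil => rfl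
  | cons h t ih => simp only [List.foldl_cons, List.flatMap_cons, List.foldl_append, ih]

-- A's branchy step is a single keyed insert of getD + (0 or 1)
theorem pv_stepA_eq (d : PySem.Dict String Int) (x : String × Int) :
    pvStepA d x = d.insert x.1 (d.getD x.1 0 + (if x.2 == 0 then 1 else 0)) := by
  unfold pvStepA
  by_cases h : d.contains x.1 = true
  · rw [if_pos h]
  · have h' : d.contains x.1 = false := by simpa using h
    rw [if_neg (by simp [h']), PySem.Dict.getD_of_not_contains d 0 h', zero_add]

theorem pv_getD_insertAdd (l : List (String × Int)) (k : String) :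
    ∀ d : PySem.Dict String Int,
    (l.foldl (fun d x => d.insert x.1 (d.getD x.1 0 + (if x.2 == 0 then 1 else 0))) d).getD k 0
      = d.getD k 0 + (l.countP (fun x => x.1 == k && x.2 == 0) : Int) := by
  induction l with
  | nil => intro d; simp
  | cons x t ih =>
    intro d
    simp only [List.foldl_cons, List.countP_cons]
    rw [ih, PySem.Dict.getD_insert]
    by_cases hk : k = x.1
    · subst hk
      by_cases h0 : x.2 = 0
      · have hb : (x.2 == 0) = true := by simp [h0]
        simp [hb]
        ring
      · have hb : (x.2 == 0) = false := by simp [h0]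
        simp [hb]
    · have hbk : (x.1 == k) = false := by
        simp only [beq_eq_false_iff_ne, ne_eq]
        exact fun h => hk h.symm
      rw [if_neg hk]
      simp [hbk]

-- B's tally of the zero-features list IS the per-key zero count of the pair list
theorem pv_count_zero_features (l : List (String × Int)) (k : String) :
    ((l.filter (fun x => x.2 == 0)).map (·.1)).count k
      = l.countP (fun x => x.1 == k && x.2 == 0) := by
  rw [List.count_eq_countP, List.countP_map, List.countP_filter]
  rfl

-- the whole equivalence on the flattened pair list
theorem pv_main (l : List (String × Int)) :
    (l.foldl pvStepA (PySem.Dict.empty : PySem.Dict String Int)).items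
      = (PySem.List.dedup (l.map (·.1))).map
          (fun f => (f, (((l.filter (fun x => x.2 == 0)).map (·.1)).foldl
              (fun d g => d.insert g (d.getD g 0 + 1))
              (PySem.Dict.empty : PySem.Dict String Int)).getD f 0)) := by
  have hA : pvStepA = fun (d : PySem.Dict String Int) (x : String × Int) =>
      d.insert x.1 (d.getD x.1 0 + (if x.2 == 0 then 1 else 0)) :=
    funext fun d => funext fun x => pv_stepA_eq d x
  rw [hA]
  have hk : (l.foldl (fun d x => d.insert x.1 (d.getD x.1 0 + (if x.2 == 0 then 1 else 0)))
      (PySem.Dict.empty : PySem.Dict String Int)).keys = PySem.Set.ofList (l.map (·.1)) := by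
    rw [PySem.Dict.keys_foldl_insert_key l (fun x => x.1)
      (fun d x => d.getD x.1 0 + (if x.2 == 0 then 1 else 0)) (PySem.Dict.empty : PySem.Dict String Int),
      PySem.Dict.keys_empty]
    rfl
  have hnd : (l.foldl (fun d x => d.insert x.1 (d.getD x.1 0 + (if x.2 == 0 then 1 else 0)))
      (PySem.Dict.empty : PySem.Dict String Int)).keys.Nodup :=
    PySem.Dict.nodup_keys_foldl_insert_key l (fun x => x.1) _ _ PySem.Dict.nodup_keys_empty
  rw [PySem.Dict.items_eq_map_keys _ hnd (0 : Int), hk, PySem.List.dedup_eq_ofList]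
  apply List.map_congr_left
  intro k _
  rw [pv_getD_insertAdd, PySem.Dict.getD_empty, zero_add,
    PySem.Dict.getD_foldl_insert_add_one, PySem.Dict.getD_empty, zero_add,
    pv_count_zero_features]

-- ===== VERDICT (by name: the statement is the Claim_ definition above) =====
theorem move_possibility_spec : Claim_equal_move_possibility := by
  unfold Claim_equal_move_possibility
  intro ms _
  unfold Spec_move_possibility
  simp only [move_possibility, move_possibility_alt]
  rw [pv_foldl_nested]
  exact pv_main (ms.flatMap (fun island => island.2))
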